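-- pv_equiv track=rewrite | github.com/anze3db/adventofcode2024 | 20.py | part1
-- ===== SOURCE A (Python) =====
-- import heapq
--
-- def part1(inp: str):
--     """Inneficient, but I didn't bother fixing it once I solved p2"""
--     lines = inp.splitlines()
--     result = 0
--     walls = set()
--     start = (0, 0)
--     end = (0, 0)
--     path = set()
--     for y, line in enumerate(lines):
--         for x, c in enumerate(line):
--             if c == "S":
--                 start = (x, y)
--             elif c == "E":
--                 end = (x, y)
--             elif c == "#":
--                 walls.add((x, y))
--             elif c == ".":
--                 path.add((x, y))
--     path.add(start)
--     path.add(end)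
--
--     to_visit = [(0, start)]
--     visited = set()
--
--     while to_visit:
--         cost, (x, y) = heapq.heappop(to_visit)
--         if (x, y) in visited:
--             continue
--         visited.add((x, y))
--         if (x, y) == end:
--             result = cost
--             break
--         for dx, dy in [(0, 1), (0, -1), (1, 0), (-1, 0)]:
--             if (x + dx, y + dy) in walls:
--                 continue
--             heapq.heappush(to_visit, (cost + 1, (x + dx, y + dy)))
--     inital_result = result
--     saved = []
--     for wall in walls:
--         path.add(wall)
--         to_visit = [(0, start)]
--         visited = set()
--
--         while to_visit:
--             cost, (x, y) = heapq.heappop(to_visit)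
--             if (x, y) in visited:
--                 continue
--             visited.add((x, y))
--             if (x, y) == end:
--                 result = cost
--                 break
--             for dx, dy in [(0, 1), (0, -1), (1, 0), (-1, 0)]:
--                 if (x + dx, y + dy) not in path:
--                     continue
--                 heapq.heappush(to_visit, (cost + 1, (x + dx, y + dy)))
--         if result < inital_result:
--             saved.append(inital_result - result)
--         path.remove(wall)
--     return len([r for r in saved if r >= 100])
-- ===== SOURCE B (Python) =====
-- def part1(inp: str):
--     """Dijkstra's array variant: a per-cell tentative-distance table with
--     extract-min and in-place relaxation instead of a binary heap."""
--     lines = inp.splitlines()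
--     walls = set()
--     start = (0, 0)
--     end = (0, 0)
--     path = set()
--     for y, line in enumerate(lines):
--         for x, c in enumerate(line):
--             if c == "S":
--                 start = (x, y)
--             elif c == "E":
--                 end = (x, y)
--             elif c == "#":
--                 walls.add((x, y))
--             elif c == ".":
--                 path.add((x, y))
--     path.add(start)
--     path.add(end)
--
--     result = 0
--     frontier = {start: 0}
--     visited = set()
--     while frontier:
--         cost, (x, y) = min((c, p) for p, c in frontier.items())
--         del frontier[(x, y)]
--         visited.add((x, y))
--         if (x, y) == end:
--             result = cost
--             break
--         for n in ((x, y + 1), (x, y - 1), (x + 1, y), (x - 1, y)):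
--             if n in walls or n in visited:
--                 continue
--             if n not in frontier or frontier[n] > cost + 1:
--                 frontier[n] = cost + 1
--     initial = result
--
--     count = 0
--     for wall in walls:
--         path.add(wall)
--         frontier = {start: 0}
--         visited = set()
--         while frontier:
--             cost, (x, y) = min((c, p) for p, c in frontier.items())
--             del frontier[(x, y)]
--             visited.add((x, y))
--             if (x, y) == end:
--                 result = cost
--                 break
--             for n in ((x, y + 1), (x, y - 1), (x + 1, y), (x - 1, y)):
--                 if n not in path or n in visited:
--                     continue
--                 if n not in frontier or frontier[n] > cost + 1:
--                     frontier[n] = cost + 1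
--         path.remove(wall)
--         if initial - result >= 100:
--             count += 1
--     return count
-- ===== Notes on version B (the rewrite author's own statement) =====
-- stated objective: alternative
-- what changed: B replaces A's lazy-deletion heapq search (duplicate heap entries plus a visited-skip loop) by Dijkstra's array variant - a per-cell tentative-distance table with extract-min and in-place relaxation - and counts the >=100 savings directly instead of building a savings list and filtering it at the end.
import Mathlib
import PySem

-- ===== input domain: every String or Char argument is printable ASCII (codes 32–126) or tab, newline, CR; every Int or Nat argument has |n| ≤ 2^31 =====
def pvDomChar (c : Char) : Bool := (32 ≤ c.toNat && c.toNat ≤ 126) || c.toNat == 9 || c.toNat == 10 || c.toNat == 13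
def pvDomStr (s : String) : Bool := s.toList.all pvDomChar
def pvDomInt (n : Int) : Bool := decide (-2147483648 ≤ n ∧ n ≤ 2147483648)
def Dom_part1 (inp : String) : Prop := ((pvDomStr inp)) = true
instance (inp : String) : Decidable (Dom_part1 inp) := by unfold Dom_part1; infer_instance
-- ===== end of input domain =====

-- B replaces A's lazy-deletion binary heap (duplicate entries + visited-skip loop) by
-- Dijkstra's array variant: a per-cell tentative-distance table with extract-min and
-- in-place relaxation, and counts the ≥100 savings directly (objective: alternative).
-- Both searches are ported with an explicit fuel bound that exceeds the pop count of
-- every run in which the Python terminates (both Pythons loop forever on grids whose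
-- reachable region is infinite and misses the end cell; nothing is claimed about those
-- runs beyond A-port = B-port).

-- ===== SHARED HELPERS (code both Pythons contain verbatim) =====

-- Python's lexicographic order on entries (cost, (x, y))
def pvKLe (a b : Int × Int × Int) : Bool :=
  decide (a.1 < b.1 ∨ (a.1 = b.1 ∧ (a.2.1 < b.2.1 ∨ (a.2.1 = b.2.1 ∧ a.2.2 ≤ b.2.2))))

-- running minimum (first extremal element wins, as heapq's pop / Python's min)
def pvBestPair (k : Int × Int × Int) (t : List (Int × Int × Int)) : Int × Int × Int :=
  t.foldl (fun m x => if pvKLe m x then m else x) k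

-- the character scan both Pythons share verbatim: walls, start, end, path
def pvParse (inp : String) :
    PySem.Set (Int × Int) × (Int × Int) × (Int × Int) × PySem.Set (Int × Int) :=
  let lines := PySem.Str.splitlines inp
  (PySem.List.enumerate lines 0).foldl (fun st yl =>
    (PySem.List.enumerate yl.2.toList 0).foldl (fun st xc =>
      let p : Int × Int := (xc.1, yl.1)
      if xc.2 = 'S' then (st.1, p, st.2.2.1, st.2.2.2)
      else if xc.2 = 'E' then (st.1, st.2.1, p, st.2.2.2)
      else if xc.2 = '#' then (PySem.Set.add st.1 p, st.2.1, st.2.2.1, st.2.2.2)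
      else if xc.2 = '.' then (st.1, st.2.1, st.2.2.1, PySem.Set.add st.2.2.2 p)
      else st) st)
    ((PySem.Set.empty : PySem.Set (Int × Int)), ((0 : Int), (0 : Int)), ((0 : Int), (0 : Int)),
      (PySem.Set.empty : PySem.Set (Int × Int)))

-- ===== PORT A =====

-- model of heapq: the heap is the multiset of pushed entries; heappop removes the least
def pvHeapMin (h : List (Int × Int × Int)) : Option (Int × Int × Int) :=
  match h with
  | [] => none
  | k :: t => some (pvBestPair k t)

def pvRemoveFirst (a : Int × Int × Int) : List (Int × Int × Int) → List (Int × Int × Int)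
  | [] => []
  | k :: t => if k = a then t else k :: pvRemoveFirst a t

theorem pvBestPair_mem : ∀ (t : List (Int × Int × Int)) (k : Int × Int × Int),
    pvBestPair k t ∈ k :: t := by
  intro t
  induction t with
  | nil => intro k; simp [pvBestPair]
  | cons x xs ih =>
    intro k
    have hred : pvBestPair k (x :: xs) = pvBestPair (if pvKLe k x then k else x) xs := by
      simp [pvBestPair]
    rw [hred]
    have h := ih (if pvKLe k x then k else x)
    rcases List.mem_cons.mp h with h1 | h1
    · rw [h1]; split_ifs <;> simp
    · simp [h1]

theorem pvRemoveFirst_length (a : Int × Int × Int) :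
    ∀ l : List (Int × Int × Int), a ∈ l → (pvRemoveFirst a l).length + 1 = l.length := by
  intro l
  induction l with
  | nil => intro h; simp at h
  | cons k t ih =>
    intro hl
    by_cases hk : k = a
    · simp [pvRemoveFirst, hk]
    · have ht : a ∈ t := by
        rcases List.mem_cons.mp hl with h | h
        · exact absurd h.symm hk
        · exact h
      have := ih ht
      simp only [pvRemoveFirst, if_neg hk, List.length_cons]
      omega

-- the `while`'s `if (x, y) in visited: continue` skip phase, then one accepted pop
def pvSkipPop (visited : PySem.Set (Int × Int)) (h : List (Int × Int × Int)) :
    Option ((Int × Int × Int) × List (Int × Int × Int)) :=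
  match hm : pvHeapMin h with
  | none => none
  | some m =>
    if PySem.Set.contains visited m.2 then pvSkipPop visited (pvRemoveFirst m h)
    else some (m, pvRemoveFirst m h)
termination_by h.length
decreasing_by
  have hmem : m ∈ h := by
    cases h with
    | nil => simp [pvHeapMin] at hm
    | cons k t => simp [pvHeapMin] at hm; subst hm; exact pvBestPair_mem t k
  have := pvRemoveFirst_length m h hmem
  omega

-- A's Dijkstra loop; `res` is the incoming `result` variable (returned unchanged
-- when the heap dries up, as in the Python); fuel bounds the accepted pops
def pvSearchA (blocked : Int × Int → Bool) (endc : Int × Int) :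
    Nat → List (Int × Int × Int) → PySem.Set (Int × Int) → Int → Int
  | 0, _, _, res => res
  | f + 1, heap, visited, res =>
    match pvSkipPop visited heap with
    | none => res
    | some (m, h') =>
      let visited' := PySem.Set.add visited m.2
      if m.2 = endc then m.1
      else
        pvSearchA blocked endc f
          (([((0 : Int), (1 : Int)), (0, -1), (1, 0), (-1, 0)]).foldl
            (fun h d =>
              let n := (m.2.1 + d.1, m.2.2 + d.2)
              if blocked n then h else h ++ [(m.1 + 1, n)]) h')
          visited' res

def part1 (inp : String) : Int :=
  let st0 := pvParse inp
  let walls := st0.1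
  let start := st0.2.1
  let endc := st0.2.2.1
  let path := PySem.Set.add (PySem.Set.add st0.2.2.2 start) endc
  let fuel := (inp.toList.length + 4) ^ 5
  let result := pvSearchA (fun n => PySem.Set.contains walls n) endc fuel
    [((0 : Int), start)] PySem.Set.empty 0
  let inital := result
  let fin := walls.foldl
    (fun (st : PySem.Set (Int × Int) × Int × List Int) w =>
      let path1 := PySem.Set.add st.1 w
      let r := pvSearchA (fun n => !(PySem.Set.contains path1 n)) endc fuel
        [((0 : Int), start)] PySem.Set.empty st.2.1
      let saved' := if r < inital then st.2.2 ++ [inital - r] else st.2.2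
      (PySem.Set.discard path1 w, r, saved'))
    (path, result, ([] : List Int))
  ((fin.2.2.filter (fun r => 100 ≤ r)).length : Int)

-- ===== PORT B =====

-- min((c, p) for p, c in frontier.items())
def pvFrMin (fr : PySem.Dict (Int × Int) Int) : Option (Int × Int × Int) :=
  match fr.items.map (fun q => (q.2, q.1)) with
  | [] => none
  | k :: t => some (pvBestPair k t)

-- B's while loop: per-cell tentative-distance table (the frontier) with extract-min;
-- `some c` = `result = cost; break`, `none` = the loop ended with `result` untouched;
-- same fuel bound as A's port
def pvSearchB (blocked : Int × Int → Bool) (endc : Int × Int) :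
    Nat → PySem.Dict (Int × Int) Int → PySem.Set (Int × Int) → Option Int
  | 0, _, _ => none
  | f + 1, fr, visited =>
    match pvFrMin fr with
    | none => none
    | some m =>
      let fr1 := fr.erase m.2
      let visited' := PySem.Set.add visited m.2
      if m.2 = endc then some m.1
      else
        pvSearchB blocked endc f
          (([(m.2.1, m.2.2 + 1), (m.2.1, m.2.2 - 1), (m.2.1 + 1, m.2.2), (m.2.1 - 1, m.2.2)]).foldl
            (fun fr n =>
              if blocked n || PySem.Set.contains visited' n then fr
              else
                match fr.get? n with
                | none => fr.insert n (m.1 + 1)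
                | some v => if m.1 + 1 < v then fr.insert n (m.1 + 1) else fr) fr1)
          visited'

def part1_alt (inp : String) : Int :=
  let st0 := pvParse inp
  let walls := st0.1
  let start := st0.2.1
  let endc := st0.2.2.1
  let path := PySem.Set.add (PySem.Set.add st0.2.2.2 start) endc
  let fuel := (inp.toList.length + 4) ^ 5
  let d0 := pvSearchB (fun n => PySem.Set.contains walls n) endc fuel
    (PySem.Dict.ofList [(start, (0 : Int))]) PySem.Set.empty
  let inital := d0.getD 0
  let fin := walls.foldl
    (fun (st : PySem.Set (Int × Int) × Int × Int) w =>
      let path1 := PySem.Set.add st.1 w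
      let d := pvSearchB (fun n => !(PySem.Set.contains path1 n)) endc fuel
        (PySem.Dict.ofList [(start, (0 : Int))]) PySem.Set.empty
      let r := d.getD st.2.1
      let count' := if 100 ≤ inital - r then st.2.2 + 1 else st.2.2
      (PySem.Set.discard path1 w, r, count'))
    (path, inital, (0 : Int))
  fin.2.2

-- ===== PRECONDITION & SPEC =====
def Spec_part1 (inp : String) (out : Int) : Prop := out = part1_alt inp
instance (inp : String) (out : Int) : Decidable (Spec_part1 inp out) := by unfold Spec_part1; infer_instance

-- ===== CLAIM (what is proved, stated in full; the proofs are below) =====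
def Claim_equal_part1 : Prop := ∀ (inp : String), Dom_part1 inp → Spec_part1 inp (part1 inp)

-- ===== LEMMAS AND PROOFS =====

theorem pvKLe_refl (a : Int × Int × Int) : pvKLe a a = true := by
  simp [pvKLe]

-- multiset of costs the heap holds for cell q
def pvCosts (h : List (Int × Int × Int)) (q : Int × Int) : List Int :=
  h.filterMap (fun e => if e.2 = q then some e.1 else none)

-- the simulation invariant: the frontier is the per-cell minimum of the heap's
-- unvisited entries; visited cells are never in the frontier
def pvInv (h : List (Int × Int × Int)) (fr : PySem.Dict (Int × Int) Int)
    (visited : PySem.Set (Int × Int)) : Prop :=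
  fr.keys.Nodup ∧ (∀ q, q ∈ visited → fr.get? q = none) ∧
  (∀ q, q ∉ visited → fr.get? q = PySem.List.min? (pvCosts h q) (fun c => c))

theorem pvKLe_total (a b : Int × Int × Int) : pvKLe a b = true ∨ pvKLe b a = true := by
  simp only [pvKLe, decide_eq_true_eq]; omega

theorem pvKLe_trans {a b c : Int × Int × Int} (h1 : pvKLe a b = true) (h2 : pvKLe b c = true) :
    pvKLe a c = true := by
  simp only [pvKLe, decide_eq_true_eq] at *; omega

theorem pvKLe_antisymm {a b : Int × Int × Int} (h1 : pvKLe a b = true) (h2 : pvKLe b a = true) :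
    a = b := by
  simp only [pvKLe, decide_eq_true_eq] at *
  have h3 : a.1 = b.1 ∧ a.2.1 = b.2.1 ∧ a.2.2 = b.2.2 := by omega
  exact Prod.ext h3.1 (Prod.ext h3.2.1 h3.2.2)

theorem pvBestPair_isMin : ∀ (t : List (Int × Int × Int)) (k : Int × Int × Int),
    ∀ e ∈ k :: t, pvKLe (pvBestPair k t) e = true := by
  intro t
  induction t with
  | nil => intro k e he; simp at he; subst he; exact pvKLe_refl _
  | cons x xs ih =>
    intro k e he
    have hred : pvBestPair k (x :: xs) = pvBestPair (if pvKLe k x then k else x) xs := by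
      simp [pvBestPair]
    rw [hred]
    have hk' : pvKLe (if pvKLe k x then k else x) k = true ∧
        pvKLe (if pvKLe k x then k else x) x = true := by
      by_cases h : pvKLe k x = true
      · simp [h, pvKLe_refl]
      · rcases pvKLe_total k x with h1 | h1
        · exact absurd h1 h
        · simp [h, h1, pvKLe_refl]
    have hbest := pvBestPair_mem xs (if pvKLe k x then k else x)
    have hmin : pvKLe (pvBestPair (if pvKLe k x then k else x) xs)
        (if pvKLe k x then k else x) = true :=
      ih (if pvKLe k x then k else x) _ (List.mem_cons_self ..)
    rcases List.mem_cons.mp he with h1 | h1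
    · subst h1; exact pvKLe_trans hmin hk'.1
    · rcases List.mem_cons.mp h1 with h2 | h2
      · subst h2; exact pvKLe_trans hmin hk'.2
      · exact ih (if pvKLe k x then k else x) e (List.mem_cons_of_mem _ h2)

-- membership/bookkeeping facts about the cost multiset and the heap model

theorem mem_pvCosts {h : List (Int × Int × Int)} {q : Int × Int} {c : Int} :
    c ∈ pvCosts h q ↔ (c, q) ∈ h := by
  simp only [pvCosts, List.mem_filterMap]
  constructor
  · rintro ⟨e, he, hfe⟩
    by_cases h2 : e.2 = q
    · simp [h2] at hfe; rcases hfe with rfl; rw [← h2]; simpa using he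
    · simp [h2] at hfe
  · intro hm; exact ⟨(c, q), hm, by simp⟩

theorem pvCosts_append (h h' : List (Int × Int × Int)) (q : Int × Int) :
    pvCosts (h ++ h') q = pvCosts h q ++ pvCosts h' q := by
  simp [pvCosts, List.filterMap_append]

theorem pvCosts_snoc (h : List (Int × Int × Int)) (a : Int) (n q : Int × Int) :
    pvCosts (h ++ [(a, n)]) q = pvCosts h q ++ (if n = q then [a] else []) := by
  rw [pvCosts_append]; by_cases h2 : n = q <;> simp [pvCosts, h2]

theorem mem_pvRemoveFirst_or (a : Int × Int × Int) :
    ∀ (l : List (Int × Int × Int)) (e : Int × Int × Int), e ∈ l → e = a ∨ e ∈ pvRemoveFirst a l := by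
  intro l
  induction l with
  | nil => intro e he; simp at he
  | cons k t ih =>
    intro e he
    by_cases hk : k = a
    · subst hk
      rcases List.mem_cons.mp he with h1 | h1
      · exact Or.inl h1
      · right; simpa [pvRemoveFirst] using h1
    · rcases List.mem_cons.mp he with h1 | h1
      · right; simp [pvRemoveFirst, hk, h1]
      · rcases ih e h1 with h2 | h2
        · exact Or.inl h2
        · right; simp [pvRemoveFirst, hk, h2]

theorem mem_of_mem_pvRemoveFirst (a : Int × Int × Int) :
    ∀ (l : List (Int × Int × Int)) (e : Int × Int × Int), e ∈ pvRemoveFirst a l → e ∈ l := by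
  intro l
  induction l with
  | nil => intro e he; simp [pvRemoveFirst] at he
  | cons k t ih =>
    intro e he
    by_cases hk : k = a
    · simp only [pvRemoveFirst, if_pos hk] at he; exact List.mem_cons_of_mem _ he
    · simp only [pvRemoveFirst, if_neg hk] at he
      rcases List.mem_cons.mp he with h1 | h1
      · simp [h1]
      · exact List.mem_cons_of_mem _ (ih e h1)

theorem pvCosts_pvRemoveFirst_ne (a : Int × Int × Int) {q : Int × Int} (hq : a.2 ≠ q) :
    ∀ l : List (Int × Int × Int), pvCosts (pvRemoveFirst a l) q = pvCosts l q := by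
  intro l
  induction l with
  | nil => simp [pvRemoveFirst]
  | cons k t ih =>
    by_cases hk : k = a
    · subst hk
      simp only [pvRemoveFirst]
      simp [pvCosts, hq]
    · simp only [pvRemoveFirst, if_neg hk]
      simp only [pvCosts, List.filterMap_cons] at *
      cases h2 : (if k.2 = q then some k.1 else none) <;> simp [ih]

theorem pvHeapMin_eq_none_iff (h : List (Int × Int × Int)) :
    pvHeapMin h = none ↔ h = [] := by
  cases h <;> simp [pvHeapMin]

theorem pvHeapMin_mem {h : List (Int × Int × Int)} {m : Int × Int × Int}
    (hm : pvHeapMin h = some m) : m ∈ h := by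
  cases h with
  | nil => simp [pvHeapMin] at hm
  | cons k t => simp [pvHeapMin] at hm; subst hm; exact pvBestPair_mem t k

theorem pvHeapMin_isMin {h : List (Int × Int × Int)} {m : Int × Int × Int}
    (hm : pvHeapMin h = some m) : ∀ e ∈ h, pvKLe m e = true := by
  cases h with
  | nil => simp [pvHeapMin] at hm
  | cons k t => simp [pvHeapMin] at hm; subst hm; exact pvBestPair_isMin t k

-- cost-component comparison on entries of the same cell
theorem pvKLe_same_cell {c c' : Int} {p : Int × Int} (h : pvKLe (c, p) (c', p) = true) :
    c ≤ c' := by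
  simp only [pvKLe, decide_eq_true_eq] at h; omega

-- running minimum of Python's min over a snoc
theorem pvMin?_snoc_none {xs : List Int} {a : Int}
    (h : PySem.List.min? xs (fun c => c) = none) :
    PySem.List.min? (xs ++ [a]) (fun c => c) = some a := by
  simp only [PySem.List.min?] at h ⊢
  rw [List.foldl_append, h]
  rfl

theorem pvMin?_snoc_some {xs : List Int} {a m : Int}
    (h : PySem.List.min? xs (fun c => c) = some m) :
    PySem.List.min? (xs ++ [a]) (fun c => c) = if a < m then some a else some m := by
  simp only [PySem.List.min?] at h ⊢
  rw [List.foldl_append, h]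
  rfl

-- Dict.erase facts (erase is a key filter on the items list)
theorem pvFind?_filter_ne {p q : Int × Int} (hqp : q ≠ p) :
    ∀ t : List ((Int × Int) × Int),
      List.find? (fun x => x.1 == q) (t.filter (fun x => !(x.1 == p))) =
        List.find? (fun x => x.1 == q) t := by
  intro t
  induction t with
  | nil => simp
  | cons e t ih =>
    by_cases hep : e.1 = p
    · have hepb : (e.1 == p) = true := by simp [hep]
      have heqb : (e.1 == q) = false := by
        rw [beq_eq_false_iff_ne]; rw [hep]; exact fun h => hqp h.symm
      simp [hepb, heqb, ih]
    · have hepb : (e.1 == p) = false := by simp [hep]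
      by_cases heq : e.1 = q
      · have heqb : (e.1 == q) = true := by simp [heq]
        simp [hepb, heqb]
      · have heqb : (e.1 == q) = false := by simp [heq]
        simp [hepb, heqb, ih]

theorem pvGet?_erase (fr : PySem.Dict (Int × Int) Int) (p q : Int × Int) :
    (fr.erase p).get? q = if q = p then none else fr.get? q := by
  obtain ⟨items⟩ := fr
  simp only [PySem.Dict.erase, PySem.Dict.get?]
  by_cases hqp : q = p
  · subst hqp; simp
  · simp [hqp, pvFind?_filter_ne hqp]

theorem pvNodupKeys_erase (fr : PySem.Dict (Int × Int) Int) (p : Int × Int)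
    (h : fr.keys.Nodup) : (fr.erase p).keys.Nodup := by
  obtain ⟨items⟩ := fr
  simp only [PySem.Dict.erase, PySem.Dict.keys] at *
  exact h.sublist (List.Sublist.map _ List.filter_sublist)

-- reduction equations for the skip phase
theorem pvSkipPop_eq_none {visited : PySem.Set (Int × Int)} {h : List (Int × Int × Int)}
    (hm : pvHeapMin h = none) : pvSkipPop visited h = none := by
  rw [pvSkipPop]; split <;> simp_all

theorem pvSkipPop_eq_skip {visited : PySem.Set (Int × Int)} {h : List (Int × Int × Int)}
    {m : Int × Int × Int} (hm : pvHeapMin h = some m)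
    (hv : PySem.Set.contains visited m.2 = true) :
    pvSkipPop visited h = pvSkipPop visited (pvRemoveFirst m h) := by
  rw [pvSkipPop]; split <;> simp_all

theorem pvSkipPop_eq_accept {visited : PySem.Set (Int × Int)} {h : List (Int × Int × Int)}
    {m : Int × Int × Int} (hm : pvHeapMin h = some m)
    (hv : ¬ PySem.Set.contains visited m.2 = true) :
    pvSkipPop visited h = some (m, pvRemoveFirst m h) := by
  rw [pvSkipPop]; split <;> simp_all

theorem pvSkipPop_spec (visited : PySem.Set (Int × Int)) :
    ∀ h : List (Int × Int × Int),
      (pvSkipPop visited h = none → ∀ e ∈ h, e.2 ∈ visited) ∧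
      (∀ m h', pvSkipPop visited h = some (m, h') →
        m ∈ h ∧ m.2 ∉ visited ∧ (∀ e ∈ h, e.2 ∉ visited → pvKLe m e = true) ∧
        (∀ q, q ∉ visited → q ≠ m.2 → pvCosts h' q = pvCosts h q)) := by
  intro h
  induction h using pvSkipPop.induct visited with
  | case1 h hm =>
    have hnil : h = [] := (pvHeapMin_eq_none_iff h).mp hm
    subst hnil
    constructor
    · intro _ e he; simp at he
    · intro m h' hs; rw [pvSkipPop_eq_none hm] at hs; simp at hs
  | case2 h m0 hm hv ih =>
    have hv' : m0.2 ∈ visited := (PySem.Set.contains_iff _ _).mp hv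
    have hstep := pvSkipPop_eq_skip hm hv
    constructor
    · intro hs e he
      rcases mem_pvRemoveFirst_or m0 h e he with h1 | h1
      · rw [h1]; exact hv'
      · exact ih.1 (hstep ▸ hs) e h1
    · intro m h' hs
      rw [hstep] at hs
      obtain ⟨hmem, hnv, hmin, hcosts⟩ := ih.2 m h' hs
      refine ⟨mem_of_mem_pvRemoveFirst m0 h m hmem, hnv, ?_, ?_⟩
      · intro e he hev
        rcases mem_pvRemoveFirst_or m0 h e he with h1 | h1
        · exact absurd (h1 ▸ hv') hev
        · exact hmin e h1 hev
      · intro q hq hqm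
        have hqm0 : m0.2 ≠ q := fun hc => hq (hc ▸ hv')
        rw [hcosts q hq hqm, pvCosts_pvRemoveFirst_ne m0 hqm0 h]
  | case3 h m0 hm hv =>
    have hv' : m0.2 ∉ visited := fun hc => hv ((PySem.Set.contains_iff _ _).mpr hc)
    have hstep := pvSkipPop_eq_accept hm hv
    constructor
    · intro hs; rw [hstep] at hs; simp at hs
    · intro m h' hs
      rw [hstep] at hs
      obtain ⟨rfl, rfl⟩ : m0 = m ∧ pvRemoveFirst m0 h = h' := by
        constructor <;> [exact congrArg Prod.fst (Option.some.inj hs); exact congrArg Prod.snd (Option.some.inj hs)]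
      refine ⟨pvHeapMin_mem hm, hv', ?_, ?_⟩
      · intro e he _; exact pvHeapMin_isMin hm e he
      · intro q _ hqm
        exact pvCosts_pvRemoveFirst_ne m0 (fun hc => hqm hc.symm) h

theorem pvFrMin_eq_none_iff (fr : PySem.Dict (Int × Int) Int) :
    pvFrMin fr = none ↔ fr.items = [] := by
  cases h : fr.items <;> simp [pvFrMin, h]

theorem pvFrMin_some_spec {fr : PySem.Dict (Int × Int) Int} {b : Int × Int × Int}
    (h : pvFrMin fr = some b) :
    b ∈ fr.items.map (fun q => (q.2, q.1)) ∧
      ∀ t ∈ fr.items.map (fun q => (q.2, q.1)), pvKLe b t = true := by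
  cases hit : fr.items with
  | nil => simp [pvFrMin, hit] at h
  | cons e t =>
    simp only [pvFrMin, hit, List.map_cons] at h ⊢
    have hb : b = pvBestPair (e.2, e.1) (t.map (fun q => (q.2, q.1))) := by
      simpa using h.symm
    subst hb
    exact ⟨pvBestPair_mem _ _, pvBestPair_isMin _ _⟩

-- under the invariant the frontier's minimum IS the accepted pop of the heap
theorem pvFrMin_of_inv {heap : List (Int × Int × Int)} {fr : PySem.Dict (Int × Int) Int}
    {visited : PySem.Set (Int × Int)} (hinv : pvInv heap fr visited) :
    (pvSkipPop visited heap = none → pvFrMin fr = none) ∧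
    (∀ m h', pvSkipPop visited heap = some (m, h') → pvFrMin fr = some m) := by
  obtain ⟨hnd, hvis, hunv⟩ := hinv
  constructor
  · intro hs
    rw [pvFrMin_eq_none_iff]
    by_contra hne
    obtain ⟨e, he⟩ := List.exists_mem_of_ne_nil _ hne
    have hget : fr.get? e.1 = some e.2 := PySem.Dict.get?_of_mem_items fr (by simpa using he) hnd
    have hq : e.1 ∉ visited := by
      intro hc; rw [hvis e.1 hc] at hget; simp at hget
    have hmin : PySem.List.min? (pvCosts heap e.1) (fun c => c) = some e.2 := by
      rw [← hunv e.1 hq]; exact hget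
    have hmem : (e.2, e.1) ∈ heap := mem_pvCosts.mp (PySem.List.min?_mem hmin)
    have := (pvSkipPop_spec visited heap).1 hs (e.2, e.1) hmem
    exact hq this
  · intro m h' hs
    obtain ⟨hmem, hnv, hminu, _⟩ := (pvSkipPop_spec visited heap).2 m h' hs
    have hc1 : m.1 ∈ pvCosts heap m.2 := mem_pvCosts.mpr (by simpa using hmem)
    have hmin? : PySem.List.min? (pvCosts heap m.2) (fun c => c) = some m.1 := by
      cases hw : PySem.List.min? (pvCosts heap m.2) (fun c => c) with
      | none => rw [PySem.List.min?_eq_none_iff] at hw; rw [hw] at hc1; simp at hc1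
      | some w =>
        have hw1 : w ≤ m.1 := PySem.List.min?_isMin hw m.1 hc1
        have hwmem : (w, m.2) ∈ heap := mem_pvCosts.mp (PySem.List.min?_mem hw)
        have hw2 : m.1 ≤ w := pvKLe_same_cell (by simpa using hminu (w, m.2) hwmem hnv)
        have : w = m.1 := le_antisymm hw1 hw2
        rw [this]
    have hget : fr.get? m.2 = some m.1 := by rw [hunv m.2 hnv]; exact hmin?
    have hitems : (m.2, m.1) ∈ fr.items := PySem.Dict.mem_items_of_get?_eq_some fr hget
    have hmT : m ∈ fr.items.map (fun q => (q.2, q.1)) := by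
      exact List.mem_map.mpr ⟨(m.2, m.1), hitems, rfl⟩
    cases hb : pvFrMin fr with
    | none =>
      rw [pvFrMin_eq_none_iff] at hb
      rw [hb] at hitems; simp at hitems
    | some b =>
      obtain ⟨hbT, hbmin⟩ := pvFrMin_some_spec hb
      have h1 : pvKLe b m = true := hbmin m hmT
      have h2 : pvKLe m b = true := by
        obtain ⟨eb, hebI, hebE⟩ := List.mem_map.mp hbT
        have hgetb : fr.get? eb.1 = some eb.2 := PySem.Dict.get?_of_mem_items fr (by simpa using hebI) hnd
        have hqb : eb.1 ∉ visited := by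
          intro hc; rw [hvis eb.1 hc] at hgetb; simp at hgetb
        have hminb : PySem.List.min? (pvCosts heap eb.1) (fun c => c) = some eb.2 := by
          rw [← hunv eb.1 hqb]; exact hgetb
        have hmemb : (eb.2, eb.1) ∈ heap := mem_pvCosts.mp (PySem.List.min?_mem hminb)
        have := hminu (eb.2, eb.1) hmemb hqb
        rw [← hebE]; exact this
      rw [pvKLe_antisymm h1 h2]

-- the two relaxation folds: A appends heap entries, B updates the distance table
def pvPushF (blocked : Int × Int → Bool) (c : Int) (h : List (Int × Int × Int))
    (ns : List (Int × Int)) : List (Int × Int × Int) :=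
  ns.foldl (fun h n => if blocked n then h else h ++ [(c + 1, n)]) h

def pvRelaxF (blocked : Int × Int → Bool) (visited' : PySem.Set (Int × Int)) (c : Int)
    (fr : PySem.Dict (Int × Int) Int) (ns : List (Int × Int)) : PySem.Dict (Int × Int) Int :=
  ns.foldl (fun fr n =>
    if blocked n || PySem.Set.contains visited' n then fr
    else
      match fr.get? n with
      | none => fr.insert n (c + 1)
      | some v => if c + 1 < v then fr.insert n (c + 1) else fr) fr

theorem pvRelaxFold (blocked : Int × Int → Bool) (visited' : PySem.Set (Int × Int)) (c : Int) :
    ∀ (ns : List (Int × Int)) (h : List (Int × Int × Int)) (fr : PySem.Dict (Int × Int) Int),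
      fr.keys.Nodup →
      (∀ q, q ∈ visited' → fr.get? q = none) →
      (∀ q, q ∉ visited' → fr.get? q = PySem.List.min? (pvCosts h q) (fun x => x)) →
      (pvRelaxF blocked visited' c fr ns).keys.Nodup ∧
      (∀ q, q ∈ visited' → (pvRelaxF blocked visited' c fr ns).get? q = none) ∧
      (∀ q, q ∉ visited' → (pvRelaxF blocked visited' c fr ns).get? q =
        PySem.List.min? (pvCosts (pvPushF blocked c h ns) q) (fun x => x)) := by
  intro ns
  induction ns with
  | nil => intro h fr h1 h2 h3; exact ⟨h1, h2, h3⟩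
  | cons n ns ih =>
    intro h fr h1 h2 h3
    by_cases hb : blocked n = true
    · simpa [pvRelaxF, pvPushF, hb] using ih h fr h1 h2 h3
    · by_cases hv : PySem.Set.contains visited' n = true
      · have hnv : n ∈ visited' := (PySem.Set.contains_iff _ _).mp hv
        have hcond : (blocked n || PySem.Set.contains visited' n) = true := by
          simp only [PySem.Set.contains] at hv ⊢; rw [hv, Bool.or_true]
        have hA : pvPushF blocked c h (n :: ns) = pvPushF blocked c (h ++ [(c + 1, n)]) ns := by
          simp [pvPushF, hb]
        have hstep :
            (if blocked n || PySem.Set.contains visited' n then fr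
             else
               match fr.get? n with
               | none => fr.insert n (c + 1)
               | some v => if c + 1 < v then fr.insert n (c + 1) else fr) = fr := by
          rw [hcond]; exact if_pos rfl
        have hB : pvRelaxF blocked visited' c fr (n :: ns) = pvRelaxF blocked visited' c fr ns := by
          simp only [pvRelaxF, List.foldl_cons, hstep]
        rw [hA, hB]
        refine ih (h ++ [(c + 1, n)]) fr h1 h2 ?_
        intro q hq
        have hqn : n ≠ q := fun hc => hq (hc ▸ hnv)
        rw [h3 q hq, pvCosts_snoc, if_neg hqn, List.append_nil]
      · have hnv : n ∉ visited' := fun hc => hv ((PySem.Set.contains_iff _ _).mpr hc)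
        have hcond : (blocked n || PySem.Set.contains visited' n) = false := by
          have hb' : blocked n = false := by simpa using hb
          have hv' : PySem.Set.contains visited' n = false := by simpa using hv
          rw [hb', hv', Bool.or_self]
        have hA : pvPushF blocked c h (n :: ns) = pvPushF blocked c (h ++ [(c + 1, n)]) ns := by
          simp [pvPushF, hb]
        have hstep :
            (if blocked n || PySem.Set.contains visited' n then fr
             else
               match fr.get? n with
               | none => fr.insert n (c + 1)
               | some v => if c + 1 < v then fr.insert n (c + 1) else fr) =
            (match fr.get? n with
             | none => fr.insert n (c + 1)
             | some v => if c + 1 < v then fr.insert n (c + 1) else fr) := by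
          rw [hcond]; exact if_neg (by simp)
        have hB : pvRelaxF blocked visited' c fr (n :: ns) =
            pvRelaxF blocked visited' c
              (match fr.get? n with
               | none => fr.insert n (c + 1)
               | some v => if c + 1 < v then fr.insert n (c + 1) else fr) ns := by
          simp only [pvRelaxF, List.foldl_cons, hstep]
        rw [hA, hB]
        have hmain : ∀ fr1 : PySem.Dict (Int × Int) Int,
            fr1 = (match fr.get? n with
              | none => fr.insert n (c + 1)
              | some v => if c + 1 < v then fr.insert n (c + 1) else fr) →
            fr1.keys.Nodup ∧ (∀ q, q ∈ visited' → fr1.get? q = none) ∧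
            (∀ q, q ∉ visited' → fr1.get? q =
              PySem.List.min? (pvCosts (h ++ [(c + 1, n)]) q) (fun x => x)) := by
          intro fr1 hfr1
          cases hg : fr.get? n with
          | none =>
            rw [hg] at hfr1; simp only at hfr1; subst hfr1
            refine ⟨PySem.Dict.nodup_keys_insert fr n (c + 1) h1, ?_, ?_⟩
            · intro q hq
              have hqn : q ≠ n := fun hc => hnv (hc ▸ hq)
              rw [PySem.Dict.get?_insert fr n q (c + 1), if_neg hqn, h2 q hq]
            · intro q hq
              by_cases hqn : q = n
              · subst hqn
                rw [PySem.Dict.get?_insert_self]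
                have hcn : PySem.List.min? (pvCosts h q) (fun x => x) = none := by
                  rw [← h3 q hq]; exact hg
                rw [pvCosts_snoc, if_pos rfl, pvMin?_snoc_none hcn]
              · rw [PySem.Dict.get?_insert fr n q (c + 1), if_neg hqn, h3 q hq,
                  pvCosts_snoc, if_neg (fun hc => hqn hc.symm), List.append_nil]
          | some v =>
            have hvmin : PySem.List.min? (pvCosts h n) (fun x => x) = some v := by
              rw [← h3 n hnv]; exact hg
            rw [hg] at hfr1; simp only at hfr1
            by_cases hlt : c + 1 < v
            · rw [if_pos hlt] at hfr1; subst hfr1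
              refine ⟨PySem.Dict.nodup_keys_insert fr n (c + 1) h1, ?_, ?_⟩
              · intro q hq
                have hqn : q ≠ n := fun hc => hnv (hc ▸ hq)
                rw [PySem.Dict.get?_insert fr n q (c + 1), if_neg hqn, h2 q hq]
              · intro q hq
                by_cases hqn : q = n
                · subst hqn
                  rw [PySem.Dict.get?_insert_self, pvCosts_snoc, if_pos rfl,
                    pvMin?_snoc_some hvmin, if_pos hlt]
                · rw [PySem.Dict.get?_insert fr n q (c + 1), if_neg hqn, h3 q hq,
                    pvCosts_snoc, if_neg (fun hc => hqn hc.symm), List.append_nil]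
            · rw [if_neg hlt] at hfr1; subst hfr1
              refine ⟨h1, h2, ?_⟩
              intro q hq
              by_cases hqn : q = n
              · subst hqn
                rw [hg, pvCosts_snoc, if_pos rfl, pvMin?_snoc_some hvmin, if_neg hlt]
              · rw [h3 q hq, pvCosts_snoc, if_neg (fun hc => hqn hc.symm), List.append_nil]
        obtain ⟨k1, k2, k3⟩ := hmain _ rfl
        exact ih (h ++ [(c + 1, n)]) _ k1 k2 k3

theorem searchAB (blocked : Int × Int → Bool) (endc : Int × Int) :
    ∀ (f : Nat) (heap : List (Int × Int × Int)) (fr : PySem.Dict (Int × Int) Int)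
      (visited : PySem.Set (Int × Int)) (res : Int), pvInv heap fr visited →
      pvSearchA blocked endc f heap visited res =
        (pvSearchB blocked endc f fr visited).getD res := by
  intro f
  induction f with
  | zero => intro heap fr visited res _; simp [pvSearchA, pvSearchB]
  | succ f ih =>
    intro heap fr visited res hinv
    cases hs : pvSkipPop visited heap with
    | none =>
      have hfm := (pvFrMin_of_inv hinv).1 hs
      simp [pvSearchA, pvSearchB, hs, hfm]
    | some mh =>
      obtain ⟨m, h'⟩ := mh
      have hfm := (pvFrMin_of_inv hinv).2 m h' hs
      obtain ⟨hmem, hnv, hminu, hcosts⟩ := (pvSkipPop_spec visited heap).2 m h' hs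
      by_cases hend : m.2 = endc
      · simp [pvSearchA, pvSearchB, hs, hfm, hend]
      · obtain ⟨hnd, hvis, hunv⟩ := hinv
        have hmid1 : (fr.erase m.2).keys.Nodup := pvNodupKeys_erase fr m.2 hnd
        have hmid2 : ∀ q, q ∈ PySem.Set.add visited m.2 → (fr.erase m.2).get? q = none := by
          intro q hq
          rw [pvGet?_erase]
          by_cases hqm : q = m.2
          · simp [hqm]
          · rw [if_neg hqm]
            rcases (PySem.Set.mem_add _ _ _).mp hq with h1 | h1
            · exact hvis q h1
            · exact absurd h1 hqm
        have hmid3 : ∀ q, q ∉ PySem.Set.add visited m.2 →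
            (fr.erase m.2).get? q = PySem.List.min? (pvCosts h' q) (fun x => x) := by
          intro q hq
          have hq1 : q ∉ visited := fun hc => hq ((PySem.Set.mem_add _ _ _).mpr (Or.inl hc))
          have hq2 : q ≠ m.2 := fun hc => hq ((PySem.Set.mem_add _ _ _).mpr (Or.inr hc))
          rw [pvGet?_erase, if_neg hq2, hunv q hq1, hcosts q hq1 hq2]
        obtain ⟨k1, k2, k3⟩ := pvRelaxFold blocked (PySem.Set.add visited m.2) m.1
          [(m.2.1, m.2.2 + 1), (m.2.1, m.2.2 - 1), (m.2.1 + 1, m.2.2), (m.2.1 - 1, m.2.2)]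
          h' (fr.erase m.2) hmid1 hmid2 hmid3
        have hrec := ih
          (pvPushF blocked m.1 h'
            [(m.2.1, m.2.2 + 1), (m.2.1, m.2.2 - 1), (m.2.1 + 1, m.2.2), (m.2.1 - 1, m.2.2)])
          (pvRelaxF blocked (PySem.Set.add visited m.2) m.1 (fr.erase m.2)
            [(m.2.1, m.2.2 + 1), (m.2.1, m.2.2 - 1), (m.2.1 + 1, m.2.2), (m.2.1 - 1, m.2.2)])
          (PySem.Set.add visited m.2) res ⟨k1, k2, k3⟩
        have hfoldA :
            ([((0 : Int), (1 : Int)), (0, -1), (1, 0), (-1, 0)]).foldl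
              (fun h d =>
                let n := (m.2.1 + d.1, m.2.2 + d.2)
                if blocked n then h else h ++ [(m.1 + 1, n)]) h' =
            pvPushF blocked m.1 h'
              [(m.2.1, m.2.2 + 1), (m.2.1, m.2.2 - 1), (m.2.1 + 1, m.2.2), (m.2.1 - 1, m.2.2)] := by
          simp only [pvPushF, List.foldl_cons, List.foldl_nil, add_zero, sub_eq_add_neg]
        simp only [pvSearchA, pvSearchB, hs, hfm, hend, if_false]
        rw [hfoldA]
        exact hrec

-- the invariant at the start of every search: one heap entry (0, start), the
-- frontier {start: 0}, nothing visited
theorem pvInvInit (start : Int × Int) :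
    pvInv [((0 : Int), start)] (PySem.Dict.ofList [(start, (0 : Int))]) PySem.Set.empty := by
  have hd : PySem.Dict.ofList [(start, (0 : Int))] = PySem.Dict.mk [(start, 0)] := by
    simp [PySem.Dict.ofList, PySem.Dict.update, PySem.Dict.empty,
      PySem.Dict.insert, PySem.Dict.contains]
  refine ⟨?_, ?_, ?_⟩
  · rw [hd]; simp [PySem.Dict.keys]
  · intro q hq; simp [PySem.Set.empty] at hq
  · intro q _
    rw [hd]
    by_cases hq : q = start
    · subst hq
      simp [PySem.Dict.get?, pvCosts, PySem.List.min?]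
    · have h1 : (start == q) = false := by
        rw [beq_eq_false_iff_ne]; exact fun hc => hq hc.symm
      have h2 : start ≠ q := fun hc => hq hc.symm
      simp [PySem.Dict.get?, pvCosts, PySem.List.min?, h1, h2]

-- the per-wall loop: A collects savings in a list and filters it at the end,
-- B counts the ≥100 savings as it goes (a saving ≥100 implies result < inital)
theorem pvOuterFold (endc start : Int × Int) (fuel : Nat) (inital : Int) :
    ∀ (ws : List (Int × Int)) (path : PySem.Set (Int × Int)) (result : Int)
      (saved : List Int) (count : Int),
      count = ((saved.filter (fun r => 100 ≤ r)).length : Int) →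
      (ws.foldl
        (fun (st : PySem.Set (Int × Int) × Int × List Int) w =>
          let path1 := PySem.Set.add st.1 w
          let r := pvSearchA (fun n => !(PySem.Set.contains path1 n)) endc fuel
            [((0 : Int), start)] PySem.Set.empty st.2.1
          let saved' := if r < inital then st.2.2 ++ [inital - r] else st.2.2
          (PySem.Set.discard path1 w, r, saved')) (path, result, saved)).1 =
      (ws.foldl
        (fun (st : PySem.Set (Int × Int) × Int × Int) w =>
          let path1 := PySem.Set.add st.1 w
          let d := pvSearchB (fun n => !(PySem.Set.contains path1 n)) endc fuel
            (PySem.Dict.ofList [(start, (0 : Int))]) PySem.Set.empty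
          let r := d.getD st.2.1
          let count' := if 100 ≤ inital - r then st.2.2 + 1 else st.2.2
          (PySem.Set.discard path1 w, r, count')) (path, result, count)).1 ∧
      (ws.foldl
        (fun (st : PySem.Set (Int × Int) × Int × List Int) w =>
          let path1 := PySem.Set.add st.1 w
          let r := pvSearchA (fun n => !(PySem.Set.contains path1 n)) endc fuel
            [((0 : Int), start)] PySem.Set.empty st.2.1
          let saved' := if r < inital then st.2.2 ++ [inital - r] else st.2.2
          (PySem.Set.discard path1 w, r, saved')) (path, result, saved)).2.1 =
      (ws.foldl
        (fun (st : PySem.Set (Int × Int) × Int × Int) w =>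
          let path1 := PySem.Set.add st.1 w
          let d := pvSearchB (fun n => !(PySem.Set.contains path1 n)) endc fuel
            (PySem.Dict.ofList [(start, (0 : Int))]) PySem.Set.empty
          let r := d.getD st.2.1
          let count' := if 100 ≤ inital - r then st.2.2 + 1 else st.2.2
          (PySem.Set.discard path1 w, r, count')) (path, result, count)).2.1 ∧
      (ws.foldl
        (fun (st : PySem.Set (Int × Int) × Int × Int) w =>
          let path1 := PySem.Set.add st.1 w
          let d := pvSearchB (fun n => !(PySem.Set.contains path1 n)) endc fuel
            (PySem.Dict.ofList [(start, (0 : Int))]) PySem.Set.empty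
          let r := d.getD st.2.1
          let count' := if 100 ≤ inital - r then st.2.2 + 1 else st.2.2
          (PySem.Set.discard path1 w, r, count')) (path, result, count)).2.2 =
      ((((ws.foldl
        (fun (st : PySem.Set (Int × Int) × Int × List Int) w =>
          let path1 := PySem.Set.add st.1 w
          let r := pvSearchA (fun n => !(PySem.Set.contains path1 n)) endc fuel
            [((0 : Int), start)] PySem.Set.empty st.2.1
          let saved' := if r < inital then st.2.2 ++ [inital - r] else st.2.2
          (PySem.Set.discard path1 w, r, saved')) (path, result, saved)).2.2.filter
            (fun r => 100 ≤ r)).length : Int)) := by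
  intro ws
  induction ws with
  | nil => intro path result saved count hc; exact ⟨rfl, rfl, hc⟩
  | cons w ws ih =>
    intro path result saved count hc
    have hsearch : pvSearchA (fun n => !(PySem.Set.contains (PySem.Set.add path w) n)) endc fuel
        [((0 : Int), start)] PySem.Set.empty result =
        (pvSearchB (fun n => !(PySem.Set.contains (PySem.Set.add path w) n)) endc fuel
          (PySem.Dict.ofList [(start, (0 : Int))]) PySem.Set.empty).getD result :=
      searchAB _ _ fuel _ _ _ _ (pvInvInit start)
    simp only [List.foldl_cons]
    rw [← hsearch]
    refine ih _ _ _ _ ?_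
    set r := pvSearchA (fun n => !(PySem.Set.contains (PySem.Set.add path w) n)) endc fuel
      [((0 : Int), start)] PySem.Set.empty result with hr
    by_cases h2 : (100 : Int) ≤ inital - r
    · have h1 : r < inital := by omega
      rw [if_pos h1, if_pos h2, hc]
      have : decide ((100 : Int) ≤ inital - r) = true := by simp [h2]
      simp [List.filter_append, this]
    · by_cases h1 : r < inital
      · rw [if_pos h1, if_neg h2, hc]
        have : decide ((100 : Int) ≤ inital - r) = false := by simp [h2]
        simp [List.filter_append, this]
      · rw [if_neg h1, if_neg h2, hc]

-- ===== VERDICT (by name: the statement is the Claim_ definition above) =====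
theorem part1_spec : Claim_equal_part1 := by
  intro inp _
  show part1 inp = part1_alt inp
  unfold part1 part1_alt
  have hinit : pvSearchA (fun n => PySem.Set.contains (pvParse inp).1 n) (pvParse inp).2.2.1
      ((inp.toList.length + 4) ^ 5) [((0 : Int), (pvParse inp).2.1)] PySem.Set.empty 0 =
      (pvSearchB (fun n => PySem.Set.contains (pvParse inp).1 n) (pvParse inp).2.2.1
        ((inp.toList.length + 4) ^ 5)
        (PySem.Dict.ofList [((pvParse inp).2.1, (0 : Int))]) PySem.Set.empty).getD 0 :=
    searchAB _ _ _ _ _ _ _ (pvInvInit _)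
  simp only []
  rw [hinit]
  obtain ⟨h1, h2, h3⟩ := pvOuterFold (pvParse inp).2.2.1 (pvParse inp).2.1
    ((inp.toList.length + 4) ^ 5)
    ((pvSearchB (fun n => PySem.Set.contains (pvParse inp).1 n) (pvParse inp).2.2.1
        ((inp.toList.length + 4) ^ 5)
        (PySem.Dict.ofList [((pvParse inp).2.1, (0 : Int))]) PySem.Set.empty).getD 0)
    (pvParse inp).1
    (PySem.Set.add (PySem.Set.add (pvParse inp).2.2.2 (pvParse inp).2.1) (pvParse inp).2.2.1)
    ((pvSearchB (fun n => PySem.Set.contains (pvParse inp).1 n) (pvParse inp).2.2.1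
        ((inp.toList.length + 4) ^ 5)
        (PySem.Dict.ofList [((pvParse inp).2.1, (0 : Int))]) PySem.Set.empty).getD 0)
    [] 0 (by simp)
  exact h3.symm
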